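-- pv_equiv track=rewrite | github.com/JMAlloway/muni | app/ingest/municipalities/ohiobuys.py | _matrix_pixel_distance
-- ===== SOURCE A (Python) =====
-- from typing import List, Dict, Any, Optional, Tuple
--
-- def _pixel_at(matrix: List[List[int]], row: int, col: int) -> int:
--
--     if row < 0 or col < 0:
--         return 0
--     if row >= len(matrix):
--         return 0
--     current_row = matrix[row]
--     if col >= len(current_row):
--         return 0
--     return current_row[col]
--
-- def _matrix_pixel_distance(
--     matrix_a: List[List[int]], matrix_b: List[List[int]]
-- ) -> int:
--
--     height = max(len(matrix_a), len(matrix_b))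
--     width = max(
--         len(matrix_a[0]) if matrix_a else 0, len(matrix_b[0]) if matrix_b else 0
--     )
--
--     distance = 0
--     for r in range(height):
--         for c in range(width):
--             distance += abs(_pixel_at(matrix_a, r, c) - _pixel_at(matrix_b, r, c))
--     return distance
-- ===== SOURCE B (Python) =====
-- def _matrix_pixel_distance(matrix_a, matrix_b):
--     height = max(len(matrix_a), len(matrix_b))
--     width = max(
--         len(matrix_a[0]) if matrix_a else 0, len(matrix_b[0]) if matrix_b else 0
--     )
--     total = 0
--     for r in range(height):
--         ra = matrix_a[r][:width] if r < len(matrix_a) else []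
--         rb = matrix_b[r][:width] if r < len(matrix_b) else []
--         n = min(len(ra), len(rb))
--         total += sum(abs(x - y) for x, y in zip(ra, rb))
--         total += sum(abs(x) for x in ra[n:])
--         total += sum(abs(x) for x in rb[n:])
--     return total
-- ===== Notes on version B (the rewrite author's own statement) =====
-- stated objective: faster
-- what changed: Replaced A's per-cell double loop over the full H-by-W bounding box (two bounds-checked _pixel_at lookups per cell) by a single pass over the rows that zips the clipped row prefixes for |x-y| and sums |x| over the unmatched tails, so no per-cell indexing remains.
import Mathlib
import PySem

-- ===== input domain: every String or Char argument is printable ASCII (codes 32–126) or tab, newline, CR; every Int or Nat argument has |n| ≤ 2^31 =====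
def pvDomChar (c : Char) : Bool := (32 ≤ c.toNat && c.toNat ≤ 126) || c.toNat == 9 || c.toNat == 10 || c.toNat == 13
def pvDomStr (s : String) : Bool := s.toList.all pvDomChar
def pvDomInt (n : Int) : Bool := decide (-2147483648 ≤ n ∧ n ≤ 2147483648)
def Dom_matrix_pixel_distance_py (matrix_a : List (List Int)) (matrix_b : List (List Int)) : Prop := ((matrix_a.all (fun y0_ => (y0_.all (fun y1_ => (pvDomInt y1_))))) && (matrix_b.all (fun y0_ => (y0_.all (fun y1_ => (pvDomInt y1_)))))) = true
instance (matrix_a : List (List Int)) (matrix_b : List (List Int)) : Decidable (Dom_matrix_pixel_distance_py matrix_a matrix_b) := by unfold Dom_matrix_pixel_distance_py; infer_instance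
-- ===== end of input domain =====

-- B replaces A's per-cell bounds-checked double loop over the full H×W bounding box by one pass
-- over the rows, summing |x-y| over zipped row prefixes and |x| over the unmatched tails (alternative/faster on sparse rows).

-- ===== PORT A =====
def pvPixelAt (matrix : List (List Int)) (row col : Int) : Int :=
  if row < 0 ∨ col < 0 then 0
  else if (matrix.length : Int) ≤ row then 0
  else
    let current_row := PySem.List.pyGetD matrix row []
    if (current_row.length : Int) ≤ col then 0
    else PySem.List.pyGetD current_row col 0

def matrix_pixel_distance_py (matrix_a : List (List Int)) (matrix_b : List (List Int)) : Int :=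
  let height : Int := max (matrix_a.length : Int) (matrix_b.length : Int)
  let width : Int := max ((matrix_a.headD []).length : Int) ((matrix_b.headD []).length : Int)
  (PySem.List.pyRange 0 height 1).foldl (fun d r =>
    (PySem.List.pyRange 0 width 1).foldl (fun d c =>
      d + |pvPixelAt matrix_a r c - pvPixelAt matrix_b r c|) d) 0

-- ===== PORT B =====
def pvRowDist (ra rb : List Int) : Int :=
  let n := min ra.length rb.length
  ((ra.zip rb).map (fun p => |p.1 - p.2|)).sum
    + ((ra.drop n).map (fun x => |x|)).sum
    + ((rb.drop n).map (fun x => |x|)).sum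

def matrix_pixel_distance_py_alt (matrix_a : List (List Int)) (matrix_b : List (List Int)) : Int :=
  let height := max matrix_a.length matrix_b.length
  let width := max (matrix_a.headD []).length (matrix_b.headD []).length
  (List.range height).foldl (fun total r =>
    let ra := if r < matrix_a.length then (matrix_a.getD r []).take width else []
    let rb := if r < matrix_b.length then (matrix_b.getD r []).take width else []
    total + pvRowDist ra rb) 0

-- ===== PRECONDITION & SPEC =====
def Spec_matrix_pixel_distance_py (matrix_a : List (List Int)) (matrix_b : List (List Int)) (out : Int) : Prop := out = matrix_pixel_distance_py_alt matrix_a matrix_b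
instance (matrix_a : List (List Int)) (matrix_b : List (List Int)) (out : Int) : Decidable (Spec_matrix_pixel_distance_py matrix_a matrix_b out) := by unfold Spec_matrix_pixel_distance_py; infer_instance

-- ===== CLAIM (what is proved, stated in full; the proofs are below) =====
def Claim_equal_matrix_pixel_distance_py : Prop := ∀ (matrix_a : List (List Int)) (matrix_b : List (List Int)), Dom_matrix_pixel_distance_py matrix_a matrix_b → Spec_matrix_pixel_distance_py matrix_a matrix_b (matrix_pixel_distance_py matrix_a matrix_b)

-- ===== LEMMAS AND PROOFS =====
theorem pvPixelAt_nat (m : List (List Int)) (r c : Nat) :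
    pvPixelAt m (r : Int) (c : Int) = (m.getD r []).getD c 0 := by
  simp only [pvPixelAt]
  have h0 : ¬ ((r : Int) < 0 ∨ (c : Int) < 0) := by omega
  rw [if_neg h0]
  by_cases hr : m.length ≤ r
  · rw [if_pos (by exact_mod_cast hr)]
    rw [List.getD_eq_default _ _ hr]; simp
  · rw [if_neg (by exact_mod_cast hr)]
    have hget : PySem.List.pyGetD m (r : Int) [] = m.getD r [] := by
      simp [PySem.List.pyGetD_natCast]
    rw [hget]
    by_cases hc : (m.getD r []).length ≤ c
    · rw [if_pos (by exact_mod_cast hc), List.getD_eq_default _ _ hc]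
    · rw [if_neg (by exact_mod_cast hc)]
      simp [PySem.List.pyGetD_natCast]

theorem pvRowDist_nil_nil : pvRowDist [] [] = 0 := by simp [pvRowDist]

theorem pvRowDist_cons_nil (x : Int) (l : List Int) :
    pvRowDist (x :: l) [] = |x| + pvRowDist l [] := by
  simp [pvRowDist]

theorem pvRowDist_nil_cons (y : Int) (l : List Int) :
    pvRowDist [] (y :: l) = |y| + pvRowDist [] l := by
  simp [pvRowDist]

theorem pvRowDist_cons_cons (x y : Int) (l m : List Int) :
    pvRowDist (x :: l) (y :: m) = |x - y| + pvRowDist l m := by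
  simp [pvRowDist]; ring

theorem pvRow_key (W : Nat) (ra rb : List Int) :
    ((List.range W).map (fun c => |ra.getD c 0 - rb.getD c 0|)).sum
      = pvRowDist (ra.take W) (rb.take W) := by
  induction W generalizing ra rb with
  | zero => simp [pvRowDist]
  | succ W ih =>
    rw [List.range_succ_eq_map]
    simp only [List.map_cons, List.map_map, List.sum_cons]
    have htail : ((List.range W).map ((fun c => |ra.getD c 0 - rb.getD c 0|) ∘ Nat.succ)).sum
        = ((List.range W).map (fun c => |ra.tail.getD c 0 - rb.tail.getD c 0|)).sum := by
      congr 1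
      refine List.map_congr_left (fun c _ => ?_)
      cases ra <;> cases rb <;> simp
    rw [htail, ih]
    cases ra with
    | nil =>
      cases rb with
      | nil => simp [pvRowDist_nil_nil]
      | cons y m => simp [pvRowDist_nil_cons]
    | cons x l =>
      cases rb with
      | nil => simp [pvRowDist_cons_nil]
      | cons y m => simp [pvRowDist_cons_cons]

-- ===== VERDICT (by name: the statement is the Claim_ definition above) =====
theorem matrix_pixel_distance_py_spec : Claim_equal_matrix_pixel_distance_py := by
  intro a b _
  show matrix_pixel_distance_py a b = matrix_pixel_distance_py_alt a b
  unfold matrix_pixel_distance_py matrix_pixel_distance_py_alt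
  set H : Nat := max a.length b.length with hH
  set W : Nat := max (a.headD []).length (b.headD []).length with hW
  have hHc : max (a.length : Int) (b.length : Int) = (H : Int) := by
    rw [hH]; push_cast; rfl
  have hWc : max ((a.headD []).length : Int) ((b.headD []).length : Int) = (W : Int) := by
    rw [hW]; push_cast; rfl
  simp only [hHc, hWc]
  rw [PySem.List.pyRange_zero_natCast, PySem.List.pyRange_zero_natCast]
  rw [List.foldl_map]
  congr 1
  funext d r
  rw [List.foldl_map]
  rw [PySem.List.foldl_add]
  have hra : (if r < a.length then (a.getD r []).take W else []) = (a.getD r []).take W := by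
    split_ifs with h
    · rfl
    · rw [List.getD_eq_default _ _ (by omega)]; simp
  have hrb : (if r < b.length then (b.getD r []).take W else []) = (b.getD r []).take W := by
    split_ifs with h
    · rfl
    · rw [List.getD_eq_default _ _ (by omega)]; simp
  simp only [hra, hrb]
  congr 1
  rw [← pvRow_key]
  congr 1
  refine List.map_congr_left (fun c _ => ?_)
  rw [pvPixelAt_nat, pvPixelAt_nat]
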